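-- pv_equiv track=rewrite | github.com/anisen943-plazza/crewai | sales_ai_debug.py | _format_analysis_content
-- ===== SOURCE A (Python) =====
-- def _format_analysis_content(content: str) -> str:
--     """Format the analysis content for better readability."""
--     # For debug mode, let's use a simpler formatting approach
--     sections = []
--     current_section = ""
--     current_title = "Overview"
--
--     for line in content.split("\n"):
--         # Check if this is a section header
--         if line.startswith("## "):
--             # Save the previous section if it's not empty
--             if current_section.strip():
--                 sections.append({
--                     "title": current_title,
--                     "content": current_section.strip()
--                 })
--
--             # Start a new section
--             current_title = line.replace("## ", "").strip()
--             current_section = ""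
--         else:
--             current_section += line + "\n"
--
--     # Add the last section
--     if current_section.strip():
--         sections.append({
--             "title": current_title,
--             "content": current_section.strip()
--         })
--
--     # Format sections into a readable format
--     if not sections:
--         return content  # Return original if parsing failed
--
--     formatted_text = ""
--     for section in sections:
--         formatted_text += f"### {section['title']}\n\n{section['content']}\n\n"
--
--     return formatted_text
-- ===== SOURCE B (Python) =====
-- def _format_analysis_content(content: str) -> str:
--     """Recursive decomposition: split off the header-free body before each
--     '## ' header, format it, and recurse on the remainder."""
--     def fmt(title, body_lines):
--         text = "\n".join(body_lines).strip()
--         return f"### {title}\n\n{text}\n\n" if text else ""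
--
--     def go(lines, title):
--         for i, line in enumerate(lines):
--             if line.startswith("## "):
--                 return fmt(title, lines[:i]) + go(lines[i + 1:], line.replace("## ", "").strip())
--         return fmt(title, lines)
--
--     out = go(content.split("\n"), "Overview")
--     return out if out else content
-- ===== Notes on version B (the rewrite author's own statement) =====
-- stated objective: simpler
-- what changed: A's single stateful loop (mutable accumulator string, mutable current title, grown section list, plus a post-loop flush and a second formatting loop) is replaced by a short recursive decomposition: find the next section-header line, format the header-free body before it, and recurse on the remainder.
import Mathlib
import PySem

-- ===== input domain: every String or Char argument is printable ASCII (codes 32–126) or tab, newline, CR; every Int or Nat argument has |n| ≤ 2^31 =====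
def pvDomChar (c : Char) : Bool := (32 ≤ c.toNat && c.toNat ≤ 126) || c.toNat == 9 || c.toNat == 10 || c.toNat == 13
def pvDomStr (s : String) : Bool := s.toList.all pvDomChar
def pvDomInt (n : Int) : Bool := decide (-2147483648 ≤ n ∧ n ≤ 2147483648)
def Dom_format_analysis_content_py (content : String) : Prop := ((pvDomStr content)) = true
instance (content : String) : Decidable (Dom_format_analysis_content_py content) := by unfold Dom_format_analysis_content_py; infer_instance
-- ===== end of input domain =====

-- B replaces A's single stateful line loop (mutable accumulator string, mutable title,
-- grown section list) by a recursive decomposition: find the next '## ' header, format the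
-- header-free body before it, recurse on the rest ('simpler': shorter, no mutable state).

-- ===== PORT A =====
def pvOverview : List Char := "Overview".toList

def pvHdr : List Char := ['#', '#', ' ']

def pvStepA (st : List (List Char × List Char) × List Char × List Char) (line : List Char) :
    List (List Char × List Char) × List Char × List Char :=
  let secs := st.1
  let cur := st.2.1
  let title := st.2.2
  if PySem.Chars.startswith line pvHdr then
    ((if PySem.Chars.strip cur ≠ [] then secs ++ [(title, PySem.Chars.strip cur)] else secs),
      [], PySem.Chars.strip (PySem.Chars.replace line pvHdr []))
  else
    (secs, cur ++ line ++ ['\n'], title)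

def pvFmtSec (s : List Char × List Char) : List Char :=
  ['#', '#', '#', ' '] ++ s.1 ++ ['\n', '\n'] ++ s.2 ++ ['\n', '\n']

def format_analysis_content_py (content : String) : String :=
  let st := (PySem.Chars.splitOn content.toList ['\n']).foldl pvStepA ([], [], pvOverview)
  let secs := if PySem.Chars.strip st.2.1 ≠ [] then st.1 ++ [(st.2.2, PySem.Chars.strip st.2.1)] else st.1
  if secs = [] then content
  else String.mk (secs.foldl (fun acc s => acc ++ pvFmtSec s) [])

-- ===== PORT B =====
def pvFmtB (title : List Char) (body : List (List Char)) : List Char :=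
  let text := PySem.Chars.strip (PySem.Chars.join ['\n'] body)
  if text ≠ [] then ['#', '#', '#', ' '] ++ title ++ ['\n', '\n'] ++ text ++ ['\n', '\n'] else []

def pvGoB (lines : List (List Char)) (title : List Char) : List Char :=
  match h : lines.findIdx? (fun l => PySem.Chars.startswith l pvHdr) with
  | some i =>
      pvFmtB title (lines.take i) ++
        pvGoB (lines.drop (i + 1))
          (PySem.Chars.strip (PySem.Chars.replace (lines.getD i []) pvHdr []))
  | none => pvFmtB title lines
termination_by lines.length
decreasing_by
  have hi : i < lines.length := (List.findIdx?_eq_some_iff_getElem.mp h).1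
  simp only [List.length_drop]
  omega

def format_analysis_content_py_alt (content : String) : String :=
  let out := pvGoB (PySem.Chars.splitOn content.toList ['\n']) pvOverview
  if out = [] then content else String.mk out

-- ===== PRECONDITION & SPEC =====
def Spec_format_analysis_content_py (content : String) (out : String) : Prop := out = format_analysis_content_py_alt content
instance (content : String) (out : String) : Decidable (Spec_format_analysis_content_py content out) := by unfold Spec_format_analysis_content_py; infer_instance

-- ===== CLAIM (what is proved, stated in full; the proofs are below) =====
def Claim_equal_format_analysis_content_py : Prop := ∀ (content : String), Dom_format_analysis_content_py content → Spec_format_analysis_content_py content (format_analysis_content_py content)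

-- ===== LEMMAS AND PROOFS =====

-- The section list A's loop produces, as a recursion over the lines.
def pvSecs (cur title : List Char) : List (List Char) → List (List Char × List Char)
  | [] => if PySem.Chars.strip cur ≠ [] then [(title, PySem.Chars.strip cur)] else []
  | l :: ls =>
      if PySem.Chars.startswith l pvHdr then
        (if PySem.Chars.strip cur ≠ [] then [(title, PySem.Chars.strip cur)] else []) ++
          pvSecs [] (PySem.Chars.strip (PySem.Chars.replace l pvHdr [])) ls
      else
        pvSecs (cur ++ l ++ ['\n']) title ls

-- '\n'-terminated concatenation, the shape of A's accumulator.
def pvTJ (b : List (List Char)) : List Char := (b.map (· ++ ['\n'])).flatten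

theorem pvFold_eq_pvSecs (lines : List (List Char)) :
    ∀ (secs : List (List Char × List Char)) (cur title : List Char),
      (let st := lines.foldl pvStepA (secs, cur, title)
        if PySem.Chars.strip st.2.1 ≠ [] then st.1 ++ [(st.2.2, PySem.Chars.strip st.2.1)] else st.1) =
      secs ++ pvSecs cur title lines := by
  induction lines with
  | nil =>
    intro secs cur title
    simp only [List.foldl_nil, pvSecs]
    split_ifs <;> simp
  | cons l ls ih =>
    intro secs cur title
    simp only [List.foldl_cons, pvSecs, pvStepA]
    by_cases hl : PySem.Chars.startswith l pvHdr = true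
    · simp only [hl, if_true]
      rw [ih]
      split_ifs <;> simp
    · simp only [Bool.not_eq_true] at hl
      simp only [hl, Bool.false_eq_true, if_false]
      rw [ih]

theorem pvStrip_append_nl (s : List Char) :
    PySem.Chars.strip (s ++ ['\n']) = PySem.Chars.strip s := by
  have hnl : PySem.Chars.isspace '\n' = true := by decide
  have hr : ∀ t : List Char, PySem.Chars.rstrip (t ++ ['\n']) = PySem.Chars.rstrip t := by
    intro t
    simp [PySem.Chars.rstrip, hnl]
  simp only [PySem.Chars.strip, PySem.Chars.lstrip]
  rw [List.dropWhile_append]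
  split_ifs with h
  · simp only [List.isEmpty_iff] at h
    rw [h]
    simp [PySem.Chars.rstrip, hnl]
  · simp only [List.isEmpty_iff] at h
    exact hr _

theorem pvTJ_eq_join (b : List (List Char)) (hb : b ≠ []) :
    pvTJ b = PySem.Chars.join ['\n'] b ++ ['\n'] := by
  induction b with
  | nil => exact absurd rfl hb
  | cons x xs ih =>
    cases xs with
    | nil => simp [pvTJ, PySem.Chars.join, List.intercalate]
    | cons y ys =>
      simp only [pvTJ, List.map_cons, List.flatten_cons] at ih ⊢
      rw [ih (by simp), PySem.Chars.join_cons_cons]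
      simp

theorem pvStrip_pvTJ (b : List (List Char)) :
    PySem.Chars.strip (pvTJ b) = PySem.Chars.strip (PySem.Chars.join ['\n'] b) := by
  cases b with
  | nil => simp [pvTJ, PySem.Chars.join, List.intercalate]
  | cons x xs => rw [pvTJ_eq_join _ (by simp), pvStrip_append_nl]

theorem pvSecs_body (b : List (List Char)) (hb : ∀ l ∈ b, PySem.Chars.startswith l pvHdr = false) :
    ∀ (cur title : List Char) (rest : List (List Char)),
      pvSecs cur title (b ++ rest) = pvSecs (cur ++ pvTJ b) title rest := by
  induction b with
  | nil => intro cur title rest; simp [pvTJ]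
  | cons l ls ih =>
    intro cur title rest
    have hl := hb l (by simp)
    simp only [List.cons_append, pvSecs, hl, Bool.false_eq_true, if_false]
    rw [ih (fun x hx => hb x (by simp [hx]))]
    simp [pvTJ, List.append_assoc]

theorem pvFoldFmt (S : List (List Char × List Char)) :
    ∀ a : List Char, S.foldl (fun acc s => acc ++ pvFmtSec s) a = a ++ (S.map pvFmtSec).flatten := by
  induction S with
  | nil => simp
  | cons s S ih => intro a; simp [ih, List.append_assoc]

theorem pvGoB_some (lines : List (List Char)) (title : List Char) (i : Nat)
    (h : lines.findIdx? (fun l => PySem.Chars.startswith l pvHdr) = some i) :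
    pvGoB lines title =
      pvFmtB title (lines.take i) ++
        pvGoB (lines.drop (i + 1))
          (PySem.Chars.strip (PySem.Chars.replace (lines.getD i []) pvHdr [])) := by
  rw [pvGoB]
  split
  · rename_i i' h'
    rw [h] at h'
    cases h'
    rfl
  · rename_i h'
    rw [h] at h'
    cases h'

theorem pvGoB_none (lines : List (List Char)) (title : List Char)
    (h : lines.findIdx? (fun l => PySem.Chars.startswith l pvHdr) = none) :
    pvGoB lines title = pvFmtB title lines := by
  rw [pvGoB]
  split
  · rename_i i' h'
    rw [h] at h'
    cases h'
  · rfl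

theorem pvGoB_eq (lines : List (List Char)) (title : List Char) :
    pvGoB lines title = ((pvSecs [] title lines).map pvFmtSec).flatten := by
  induction lines, title using pvGoB.induct with
  | case1 lines title i h ih =>
    obtain ⟨hi, hp, hlt⟩ := List.findIdx?_eq_some_iff_getElem.mp h
    have hb : ∀ l ∈ lines.take i, PySem.Chars.startswith l pvHdr = false := by
      intro l hl
      obtain ⟨j, hj, rfl⟩ := List.mem_take_iff_getElem.mp hl
      have := hlt j (by omega)
      simpa using this
    have hsplit : lines = lines.take i ++ (lines[i] :: lines.drop (i + 1)) := by
      rw [List.getElem_cons_drop, List.take_append_drop]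
    rw [pvGoB_some _ _ _ h]
    conv_rhs => rw [hsplit]
    rw [pvSecs_body _ hb]
    simp only [pvSecs, List.nil_append, hp, if_true]
    rw [List.getD_eq_getElem _ _ hi] at ih ⊢
    rw [List.map_append, List.flatten_append, ih]
    congr 1
    simp only [pvFmtB, pvStrip_pvTJ]
    split_ifs with ht
    · simp [pvFmtSec, pvStrip_pvTJ]
    · simp
  | case2 lines title h =>
    have hb : ∀ l ∈ lines, PySem.Chars.startswith l pvHdr = false :=
      List.findIdx?_eq_none_iff.mp h
    have h2 : pvSecs [] title lines = pvSecs (pvTJ lines) title [] := by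
      conv_lhs => rw [← List.append_nil lines]
      rw [pvSecs_body _ hb]
      simp
    rw [pvGoB_none _ _ h, h2]
    simp only [pvSecs, pvFmtB, pvStrip_pvTJ]
    split_ifs with ht
    · simp [pvFmtSec]
    · simp

theorem pvFmtSec_ne_nil (s : List Char × List Char) : pvFmtSec s ≠ [] := by
  simp [pvFmtSec]

theorem pvFlatten_nil_iff (S : List (List Char × List Char)) :
    ((S.map pvFmtSec).flatten = []) ↔ S = [] := by
  cases S with
  | nil => simp
  | cons s S =>
    simp only [List.map_cons, List.flatten_cons, List.append_eq_nil_iff]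
    constructor
    · rintro ⟨h, -⟩; exact absurd h (pvFmtSec_ne_nil s)
    · intro h; exact absurd h (by simp)

-- ===== VERDICT (by name: the statement is the Claim_ definition above) =====
theorem format_analysis_content_py_spec : Claim_equal_format_analysis_content_py := by
  intro content _
  simp only [Spec_format_analysis_content_py, format_analysis_content_py,
    format_analysis_content_py_alt]
  have hfold := pvFold_eq_pvSecs (PySem.Chars.splitOn content.toList ['\n']) [] [] pvOverview
  simp only [List.nil_append] at hfold
  rw [hfold, pvGoB_eq]
  by_cases hS : pvSecs [] pvOverview (PySem.Chars.splitOn content.toList ['\n']) = []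
  · simp [hS]
  · rw [if_neg hS, if_neg (by rw [pvFlatten_nil_iff]; exact hS)]
    rw [pvFoldFmt]
    simp
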